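-- pv_equiv track=rewrite | github.com/vladisaev12/tictactoe | main.py | check_hv
-- ===== SOURCE A (Python) =====
-- def check_hv(table, player):
--     size = len(table)
--     for i in range(size):
--         flag = True
--         for j in range(size):
--             flag &= table[i][j] == player
--             if not flag:
--                 break
--         if flag:
--             return True
--
--         flag = True
--         for j in range(size):
--             flag &= table[j][i] == player
--             if not flag:
--                 break
--         if flag:
--             return True
--
--     return False
-- ===== SOURCE B (Python) =====
-- def check_hv(table, player):
--     size = len(table)
--     row_hits = [0] * size
--     col_hits = [0] * size
--     for i in range(size):
--         for j in range(size):
--             if table[i][j] == player: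
--                 row_hits[i] += 1
--                 col_hits[j] += 1
--     return any(h == size for h in row_hits) or any(h == size for h in col_hits)
-- ===== Notes on version B (the rewrite author's own statement) =====
-- stated objective: alternative
-- what changed: Replaces the per-row and per-column rescans with early breaks by one sweep over all cells that maintains row/column match counters, then checks whether any counter reached size.
-- outside the precondition, e.g. on check_hv([['x', 'y'], ['z']], 'p'): A returns False, B raises IndexError
import Mathlib
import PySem

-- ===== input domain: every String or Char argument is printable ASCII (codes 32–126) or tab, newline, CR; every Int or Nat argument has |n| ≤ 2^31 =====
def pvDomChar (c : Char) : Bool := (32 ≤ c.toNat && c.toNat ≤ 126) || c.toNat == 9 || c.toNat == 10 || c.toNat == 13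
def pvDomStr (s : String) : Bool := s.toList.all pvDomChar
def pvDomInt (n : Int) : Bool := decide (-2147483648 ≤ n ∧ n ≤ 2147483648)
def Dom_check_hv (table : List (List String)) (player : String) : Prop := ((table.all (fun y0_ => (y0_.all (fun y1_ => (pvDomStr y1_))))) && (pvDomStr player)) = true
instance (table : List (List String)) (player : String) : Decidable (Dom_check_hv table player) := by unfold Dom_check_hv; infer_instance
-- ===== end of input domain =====

-- B replaces A's separate row and column rescans (with early breaks and early return)
-- by one sweep over all cells maintaining row/column match counters; equal return value on Pre_.

-- ===== PORT A =====
-- table[i][j] with i, j drawn from range(size): in range under Pre_check_hv, where this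
-- getElem?-based access is exact (the "" default is never hit inside Pre_check_hv).
def pvCell (table : List (List String)) (i j : Nat) : String :=
  ((table.getD i []).getD j "")

-- inner loop `for j in range(size): flag &= table[i][j] == player; if not flag: break`
def pvRowLoopA (table : List (List String)) (player : String) (size i j : Nat) : Bool :=
  if j < size then
    if pvCell table i j == player then pvRowLoopA table player size i (j + 1) else false
  else true
termination_by size - j

def pvColLoopA (table : List (List String)) (player : String) (size i j : Nat) : Bool :=
  if j < size then
    if pvCell table j i == player then pvColLoopA table player size i (j + 1) else false
  else true
termination_by size - j

-- outer loop `for i in range(size)` with the two early `return True`s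
def pvOuterA (table : List (List String)) (player : String) (size i : Nat) : Bool :=
  if i < size then
    if pvRowLoopA table player size i 0 then true
    else if pvColLoopA table player size i 0 then true
    else pvOuterA table player size (i + 1)
  else false
termination_by size - i

def check_hv (table : List (List String)) (player : String) : Bool :=
  pvOuterA table player table.length 0

-- ===== PORT B =====
def check_hv_alt (table : List (List String)) (player : String) : Bool :=
  let size := table.length
  let hits :=
    (List.range size).foldl (fun acc i =>
      (List.range size).foldl (fun (acc2 : List Nat × List Nat) j =>
        if pvCell table i j == player then
          (acc2.1.set i (acc2.1.getD i 0 + 1), acc2.2.set j (acc2.2.getD j 0 + 1))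
        else acc2) acc)
      (List.replicate size 0, List.replicate size 0)
  hits.1.any (fun h => h == size) || hits.2.any (fun h => h == size)

-- ===== PRECONDITION & SPEC =====
-- Pre_ excludes tables with a row shorter than len(table): there Python A's table[i][j]
-- can raise IndexError (and B always does); see claim cites for a ragged table A returns on.
def Pre_check_hv (table : List (List String)) (player : String) : Prop :=
  ∀ row ∈ table, table.length ≤ row.length
instance (table : List (List String)) (player : String) : Decidable (Pre_check_hv table player) := by
  unfold Pre_check_hv; infer_instance

def pvWitness_check_hv : List (List String) × String := ([["x"]], "x")

def Spec_check_hv (table : List (List String)) (player : String) (out : Bool) : Prop := out = check_hv_alt table player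
instance (table : List (List String)) (player : String) (out : Bool) : Decidable (Spec_check_hv table player out) := by unfold Spec_check_hv; infer_instance

-- ===== CLAIM (what is proved, stated in full; the proofs are below) =====
def Claim_equal_check_hv : Prop := ∀ (table : List (List String)) (player : String), Dom_check_hv table player → Pre_check_hv table player → Spec_check_hv table player (check_hv table player)

-- ===== LEMMAS AND PROOFS =====

-- abbreviations used only by the proofs
def pvM (table : List (List String)) (player : String) (i j : Nat) : Bool :=
  pvCell table i j == player

def pvRowAll (t : List (List String)) (p : String) (n k : Nat) : Bool :=
  (List.range n).all (fun j => pvM t p k j)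

def pvColAll (t : List (List String)) (p : String) (n k : Nat) : Bool :=
  (List.range n).all (fun j => pvM t p j k)

-- ---- A-side characterization ----

theorem pvRowLoopA_eq (t : List (List String)) (p : String) (n i : Nat) :
    ∀ d j, n - j = d → pvRowLoopA t p n i j = (List.range' j (n - j)).all (fun k => pvM t p i k) := by
  intro d
  induction d with
  | zero =>
    intro j h
    rw [pvRowLoopA]
    have hj : ¬ j < n := by omega
    simp [hj, h]
  | succ d ih =>
    intro j h
    have hj : j < n := by omega
    have hr : n - j = (n - (j+1)) + 1 := by omega
    rw [pvRowLoopA, if_pos hj, hr, List.range'_succ, List.all_cons, ih (j+1) (by omega)]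
    cases hc : pvCell t i j == p <;> simp [pvM, hc]

theorem pvColLoopA_eq (t : List (List String)) (p : String) (n i : Nat) :
    ∀ d j, n - j = d → pvColLoopA t p n i j = (List.range' j (n - j)).all (fun k => pvM t p k i) := by
  intro d
  induction d with
  | zero =>
    intro j h
    rw [pvColLoopA]
    have hj : ¬ j < n := by omega
    simp [hj, h]
  | succ d ih =>
    intro j h
    have hj : j < n := by omega
    have hr : n - j = (n - (j+1)) + 1 := by omega
    rw [pvColLoopA, if_pos hj, hr, List.range'_succ, List.all_cons, ih (j+1) (by omega)]
    cases hc : pvCell t j i == p <;> simp [pvM, hc]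

theorem pvOuterA_eq (t : List (List String)) (p : String) (n : Nat) :
    ∀ d i, n - i = d →
      pvOuterA t p n i = (List.range' i (n - i)).any (fun k => pvRowAll t p n k || pvColAll t p n k) := by
  intro d
  induction d with
  | zero =>
    intro i h
    rw [pvOuterA]
    have hi : ¬ i < n := by omega
    simp [hi, h]
  | succ d ih =>
    intro i h
    have hi : i < n := by omega
    have hrow : pvRowLoopA t p n i 0 = pvRowAll t p n i := by
      rw [pvRowLoopA_eq t p n i (n - 0) 0 rfl, Nat.sub_zero, pvRowAll, List.range_eq_range']
    have hcol : pvColLoopA t p n i 0 = pvColAll t p n i := by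
      rw [pvColLoopA_eq t p n i (n - 0) 0 rfl, Nat.sub_zero, pvColAll, List.range_eq_range']
    have hr : n - i = (n - (i+1)) + 1 := by omega
    rw [pvOuterA, if_pos hi, hr, List.range'_succ, List.any_cons, ih (i+1) (by omega), hrow, hcol]
    cases pvRowAll t p n i <;> cases pvColAll t p n i <;> simp

-- ---- B-side characterization ----

def pvStep (t : List (List String)) (p : String) (i : Nat) :
    List Nat × List Nat → Nat → List Nat × List Nat :=
  fun acc2 j =>
    if pvCell t i j == p then
      (acc2.1.set i (acc2.1.getD i 0 + 1), acc2.2.set j (acc2.2.getD j 0 + 1))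
    else acc2

theorem pvInner_fst (t : List (List String)) (p : String) (i : Nat) :
    ∀ (L : List Nat) (r cs : List Nat) (k : Nat),
      ((L.foldl (pvStep t p i) (r, cs)).1)[k]? =
        if k = i then (r[k]?).map (· + L.countP (fun j => pvM t p i j)) else r[k]? := by
  intro L
  induction L with
  | nil =>
    intro r cs k
    split <;> simp
  | cons j L ih =>
    intro r cs k
    rw [List.foldl_cons, List.countP_cons]
    by_cases hb : (pvCell t i j == p) = true
    · rw [show pvStep t p i (r, cs) j
            = (r.set i (r.getD i 0 + 1), cs.set j (cs.getD j 0 + 1)) by simp [pvStep, hb]]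
      rw [ih]
      have hcnt : (if pvM t p i j then 1 else 0) = 1 := by simp [pvM, hb]
      rw [hcnt]
      by_cases hk : k = i
      · subst hk
        by_cases hlt : k < r.length
        · rw [List.getElem?_set_self hlt, if_pos rfl, if_pos rfl,
              List.getElem?_eq_getElem hlt, List.getD_eq_getElem r 0 hlt]
          simp; omega
        · rw [List.set_eq_of_length_le (by omega), List.getElem?_eq_none (by omega)]
          simp
      · rw [if_neg hk, if_neg hk, List.getElem?_set_ne (by omega)]
    · rw [show pvStep t p i (r, cs) j = (r, cs) by simp [pvStep, hb]]
      rw [ih]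
      have hcnt : (if pvM t p i j then 1 else 0) = 0 := by simp [pvM, hb]
      rw [hcnt]
      simp

theorem pvInner_snd (t : List (List String)) (p : String) (i : Nat) :
    ∀ (L : List Nat) (r cs : List Nat) (k : Nat),
      ((L.foldl (pvStep t p i) (r, cs)).2)[k]? =
        (cs[k]?).map (· + L.countP (fun j => j == k && pvM t p i j)) := by
  intro L
  induction L with
  | nil =>
    intro r cs k
    simp
  | cons j L ih =>
    intro r cs k
    rw [List.foldl_cons, List.countP_cons]
    by_cases hb : (pvCell t i j == p) = true
    · rw [show pvStep t p i (r, cs) j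
            = (r.set i (r.getD i 0 + 1), cs.set j (cs.getD j 0 + 1)) by simp [pvStep, hb]]
      rw [ih]
      by_cases hk : j = k
      · subst hk
        have hcnt : (if (j == j && pvM t p i j) then 1 else 0) = 1 := by simp [pvM, hb]
        rw [hcnt]
        by_cases hlt : j < cs.length
        · rw [List.getElem?_set_self hlt, List.getElem?_eq_getElem hlt,
              List.getD_eq_getElem cs 0 hlt]
          simp; omega
        · rw [List.set_eq_of_length_le (by omega), List.getElem?_eq_none (by omega)]
          simp
      · have hcnt : (if (j == k && pvM t p i j) then 1 else 0) = 0 := by simp [hk]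
        rw [hcnt, List.getElem?_set_ne (by omega)]
        simp
    · rw [show pvStep t p i (r, cs) j = (r, cs) by simp [pvStep, hb]]
      rw [ih]
      have hcnt : (if (j == k && pvM t p i j) then 1 else 0) = 0 := by simp [pvM, hb]
      rw [hcnt]
      simp

theorem pvCountP_range_eqk (n k : Nat) (q : Nat → Bool) :
    (List.range n).countP (fun j => j == k && q j) = if k < n && q k then 1 else 0 := by
  induction n with
  | zero => simp
  | succ n ih =>
    rw [List.range_succ, List.countP_append, ih]
    by_cases hk : k = n
    · subst hk
      cases hq : q k <;> simp [hq]
    · have h1 : (if (n == k && q n) = true then 1 else 0) = 0 := by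
        simp [show (n == k) = false by simp; omega]
      simp only [List.countP_cons, List.countP_nil, h1]
      by_cases hlt : k < n
      · simp [hlt, show k < n + 1 by omega]
      · simp [hlt, show ¬ k < n + 1 by omega]

def pvBody (t : List (List String)) (p : String) (n : Nat) :
    List Nat × List Nat → Nat → List Nat × List Nat :=
  fun acc i => (List.range n).foldl (pvStep t p i) acc

theorem pvOuter_fst (t : List (List String)) (p : String) (n : Nat) :
    ∀ (I : List Nat) (r cs : List Nat) (k : Nat),
      ((I.foldl (pvBody t p n) (r, cs)).1)[k]? =
        (r[k]?).map (· + I.countP (fun i => i == k) * (List.range n).countP (fun j => pvM t p k j)) := by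
  intro I
  induction I with
  | nil =>
    intro r cs k
    simp
  | cons i I ih =>
    intro r cs k
    rw [List.foldl_cons, List.countP_cons,
        show pvBody t p n (r, cs) i = ((List.range n).foldl (pvStep t p i) (r, cs)) from rfl,
        show (List.range n).foldl (pvStep t p i) (r, cs)
          = (((List.range n).foldl (pvStep t p i) (r, cs)).1,
             ((List.range n).foldl (pvStep t p i) (r, cs)).2) from rfl,
        ih, pvInner_fst]
    by_cases hk : k = i
    · subst hk
      rw [if_pos rfl, show (if (k == k) = true then 1 else 0) = 1 by simp]
      cases r[k]? <;> (simp; try ring)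
    · rw [if_neg hk, show (if (i == k) = true then 1 else 0) = 0 by simp; omega]
      simp

theorem pvOuter_snd (t : List (List String)) (p : String) (n : Nat) :
    ∀ (I : List Nat) (r cs : List Nat) (k : Nat),
      ((I.foldl (pvBody t p n) (r, cs)).2)[k]? =
        (cs[k]?).map (· + I.countP (fun i => decide (k < n) && pvM t p i k)) := by
  intro I
  induction I with
  | nil =>
    intro r cs k
    simp
  | cons i I ih =>
    intro r cs k
    rw [List.foldl_cons, List.countP_cons,
        show pvBody t p n (r, cs) i = ((List.range n).foldl (pvStep t p i) (r, cs)) from rfl,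
        show (List.range n).foldl (pvStep t p i) (r, cs)
          = (((List.range n).foldl (pvStep t p i) (r, cs)).1,
             ((List.range n).foldl (pvStep t p i) (r, cs)).2) from rfl,
        ih, pvInner_snd, pvCountP_range_eqk]
    cases cs[k]? <;> (simp; try omega)

theorem pvAny_or (l : List Nat) (p q : Nat → Bool) :
    l.any (fun x => p x || q x) = (l.any p || l.any q) := by
  induction l with
  | nil => simp
  | cons a l ih =>
    rw [List.any_cons, List.any_cons, List.any_cons, ih]
    cases p a <;> cases q a <;> simp

theorem pvRange_countP_eqk (n k : Nat) :
    (List.range n).countP (fun i => i == k) = if k < n then 1 else 0 := by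
  rw [show (fun i => i == k) = (fun j => j == k && (fun _ => true) j) by funext x; simp,
      pvCountP_range_eqk]
  simp

theorem pvHits_fst (t : List (List String)) (p : String) (n : Nat) :
    ((List.range n).foldl (pvBody t p n) (List.replicate n 0, List.replicate n 0)).1
      = (List.range n).map (fun k => (List.range n).countP (fun j => pvM t p k j)) := by
  apply List.ext_getElem?
  intro k
  rw [pvOuter_fst, List.getElem?_map, List.getElem?_replicate, pvRange_countP_eqk]
  by_cases hk : k < n
  · simp [hk]
  · rw [if_neg hk, List.getElem?_eq_none]
    all_goals simp
    all_goals omega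

theorem pvHits_snd (t : List (List String)) (p : String) (n : Nat) :
    ((List.range n).foldl (pvBody t p n) (List.replicate n 0, List.replicate n 0)).2
      = (List.range n).map (fun k => (List.range n).countP (fun i => pvM t p i k)) := by
  apply List.ext_getElem?
  intro k
  rw [pvOuter_snd, List.getElem?_replicate, List.getElem?_map]
  by_cases hk : k < n
  · rw [if_pos hk, List.getElem?_range hk,
        show (fun i => decide (k < n) && pvM t p i k) = (fun i => pvM t p i k) by
          funext x; simp [hk]]
    simp
  · rw [if_neg hk, List.getElem?_eq_none]
    all_goals simp
    all_goals omega

theorem pvCheckB_char (t : List (List String)) (p : String) :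
    check_hv_alt t p
      = ((List.range t.length).any (pvRowAll t p t.length)
          || (List.range t.length).any (pvColAll t p t.length)) := by
  have h0 : check_hv_alt t p
      = ((((List.range t.length).foldl (pvBody t p t.length)
            (List.replicate t.length 0, List.replicate t.length 0)).1.any
              (fun h => h == t.length))
        || (((List.range t.length).foldl (pvBody t p t.length)
            (List.replicate t.length 0, List.replicate t.length 0)).2.any
              (fun h => h == t.length))) := rfl
  rw [h0, pvHits_fst, pvHits_snd, List.any_map, List.any_map]
  congr 1
  · congr 1
    funext k
    show ((List.range t.length).countP (fun j => pvM t p k j) == t.length) = pvRowAll t p t.length k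
    have hc := List.countP_eq_length (p := fun j => pvM t p k j) (l := List.range t.length)
    rw [List.length_range] at hc
    rw [Bool.eq_iff_iff, beq_iff_eq, pvRowAll]
    simp only [List.all_eq_true]
    exact hc
  · congr 1
    funext k
    show ((List.range t.length).countP (fun i => pvM t p i k) == t.length) = pvColAll t p t.length k
    have hc := List.countP_eq_length (p := fun i => pvM t p i k) (l := List.range t.length)
    rw [List.length_range] at hc
    rw [Bool.eq_iff_iff, beq_iff_eq, pvColAll]
    simp only [List.all_eq_true]
    exact hc

-- ===== VERDICT (by name: the statement is the Claim_ definition above) =====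
theorem check_hv_spec : Claim_equal_check_hv := by
  unfold Claim_equal_check_hv
  intro t p _ _
  unfold Spec_check_hv
  rw [pvCheckB_char]
  rw [show check_hv t p = pvOuterA t p t.length 0 from rfl,
      pvOuterA_eq t p t.length (t.length - 0) 0 rfl, Nat.sub_zero, ← List.range_eq_range',
      pvAny_or]
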